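-- pv_equiv track=rewrite | github.com/obliojoe/who-should-lose-data | tiebreakers.py | head_to_head_sweep
-- ===== SOURCE A (Python) =====
-- def get_h2h_wins(head_to_head, team1, team2):
--     """Helper function to get head-to-head wins handling both data structures"""
--     h2h_data = head_to_head.get(team1, {}).get(team2)
--     if isinstance(h2h_data, dict):
--         return h2h_data.get('wins', 0)
--     return h2h_data or 0
--
-- def head_to_head_sweep(teams, head_to_head):
--     """
--     Check if any team has beaten all other teams in the group.
--
--     Args:
--         teams: List of team abbreviations
--         head_to_head: Dict of head-to-head results in either format
--
--     Returns:
--         Team abbreviation of sweep winner, or None if no sweep exists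
--     """
--     if not head_to_head:
--         return None
--
--     for team in teams:
--         beats_all = True
--         for other in teams:
--             if team != other:
--                 team_wins = get_h2h_wins(head_to_head, team, other)
--                 other_wins = get_h2h_wins(head_to_head, other, team)
--
--                 # If team doesn't have a winning record against any other team,
--                 # they can't have swept the group
--                 if team_wins <= other_wins:
--                     beats_all = False
--                     break
--
--         if beats_all:
--             return team
--
--     return None
-- ===== SOURCE B (Python) =====
-- def get_h2h_wins(head_to_head, team1, team2):
--     """Helper function to get head-to-head wins handling both data structures"""
--     h2h_data = head_to_head.get(team1, {}).get(team2)
--     if isinstance(h2h_data, dict):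
--         return h2h_data.get('wins', 0)
--     return h2h_data or 0
--
-- def head_to_head_sweep(teams, head_to_head):
--     """Tournament candidate elimination (one pass) + one O(n) verification."""
--     if not head_to_head:
--         return None
--     if not teams:
--         return None
--     c = teams[0]
--     for t in teams[1:]:
--         if c != t and get_h2h_wins(head_to_head, c, t) <= get_h2h_wins(head_to_head, t, c):
--             c = t
--     if all(c == o or get_h2h_wins(head_to_head, o, c) < get_h2h_wins(head_to_head, c, o)
--            for o in teams):
--         return c
--     return None
-- ===== Notes on version B (the rewrite author's own statement) =====
-- stated objective: faster
-- what changed: Replaced the nested all-pairs scan by a single-pass tournament candidate elimination followed by one O(n) verification of the surviving candidate.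
import Mathlib
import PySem

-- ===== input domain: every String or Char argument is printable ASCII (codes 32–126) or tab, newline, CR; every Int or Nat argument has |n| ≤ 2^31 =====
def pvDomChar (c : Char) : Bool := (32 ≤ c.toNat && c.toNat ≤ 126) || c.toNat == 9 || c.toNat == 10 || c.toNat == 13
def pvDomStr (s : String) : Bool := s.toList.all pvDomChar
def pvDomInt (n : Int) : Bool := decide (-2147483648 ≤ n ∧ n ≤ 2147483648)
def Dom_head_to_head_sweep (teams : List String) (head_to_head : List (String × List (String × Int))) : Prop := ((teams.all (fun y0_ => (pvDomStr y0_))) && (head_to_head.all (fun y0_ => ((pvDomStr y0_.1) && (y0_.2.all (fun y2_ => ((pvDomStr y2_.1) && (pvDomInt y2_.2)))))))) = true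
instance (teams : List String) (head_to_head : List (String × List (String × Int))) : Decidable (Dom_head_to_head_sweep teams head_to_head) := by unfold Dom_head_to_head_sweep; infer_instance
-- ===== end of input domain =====

-- B replaces A's nested all-pairs scan by one-pass candidate elimination + a single verification (faster; return value only).
-- ===== PORT A =====
-- port of get_h2h_wins: the isinstance(dict) branch can never fire on this type (values are ints), so only the 'or 0' path is ported.
def getH2HWins (head_to_head : List (String × List (String × Int))) (team1 team2 : String) : Int :=
  let d := PySem.Dict.getD (PySem.Dict.mk head_to_head) team1 []
  match PySem.Dict.get? (PySem.Dict.mk d) team2 with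
  | none => 0
  | some x => if x = 0 then 0 else x   -- 'h2h_data or 0'

-- A's inner loop over `teams` (with the break as early false)
def pvInnerA (head_to_head : List (String × List (String × Int))) (team : String) : List String → Bool
  | [] => true
  | other :: rest =>
      if team ≠ other then
        if getH2HWins head_to_head team other ≤ getH2HWins head_to_head other team then false
        else pvInnerA head_to_head team rest
      else pvInnerA head_to_head team rest

-- A's outer loop (early return of the first sweeping team)
def pvOuterA (head_to_head : List (String × List (String × Int))) (teams : List String) : List String → Option String
  | [] => none
  | team :: rest =>
      if pvInnerA head_to_head team teams then some team
      else pvOuterA head_to_head teams rest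

def head_to_head_sweep (teams : List String) (head_to_head : List (String × List (String × Int))) : Option String :=
  if head_to_head = [] then none
  else pvOuterA head_to_head teams teams

-- ===== PORT B =====
-- "c sweeps o (or is o)" check used by B's verification pass
def pvSweepPred (head_to_head : List (String × List (String × Int))) (c o : String) : Bool :=
  c == o || decide (getH2HWins head_to_head o c < getH2HWins head_to_head c o)

-- one-pass tournament candidate elimination
def pvElim (head_to_head : List (String × List (String × Int))) (c : String) : List String → String
  | [] => c
  | t :: rest =>
      if c ≠ t ∧ getH2HWins head_to_head c t ≤ getH2HWins head_to_head t c then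
        pvElim head_to_head t rest
      else pvElim head_to_head c rest

def head_to_head_sweep_alt (teams : List String) (head_to_head : List (String × List (String × Int))) : Option String :=
  if head_to_head = [] then none
  else
    match teams with
    | [] => none
    | t0 :: rest =>
      let c := pvElim head_to_head t0 rest
      if teams.all (pvSweepPred head_to_head c) then some c else none

-- ===== PRECONDITION & SPEC =====
def Spec_head_to_head_sweep (teams : List String) (head_to_head : List (String × List (String × Int))) (out : Option String) : Prop := out = head_to_head_sweep_alt teams head_to_head
instance (teams : List String) (head_to_head : List (String × List (String × Int))) (out : Option String) : Decidable (Spec_head_to_head_sweep teams head_to_head out) := by unfold Spec_head_to_head_sweep; infer_instance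

-- ===== CLAIM (what is proved, stated in full; the proofs are below) =====
def Claim_equal_head_to_head_sweep : Prop := ∀ (teams : List String) (head_to_head : List (String × List (String × Int))), Dom_head_to_head_sweep teams head_to_head → Spec_head_to_head_sweep teams head_to_head (head_to_head_sweep teams head_to_head)

-- ===== LEMMAS AND PROOFS =====

-- A's inner loop is the all-quantified sweep check
theorem innerA_eq_all (h : List (String × List (String × Int))) (t : String) (l : List String) :
    pvInnerA h t l = l.all (pvSweepPred h t) := by
  induction l with
  | nil => rfl
  | cons o rest ih =>
      simp only [pvInnerA, List.all_cons, pvSweepPred]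
      by_cases hne : t ≠ o
      · simp only [if_pos hne]
        by_cases hle : getH2HWins h t o ≤ getH2HWins h o t
        · simp only [if_pos hle]
          have : (t == o) = false := by simp [beq_eq_false_iff_ne.mpr (by exact hne)]
          simp [this, not_lt.mpr hle]
        · simp only [if_neg hle, ih]
          simp [lt_of_not_ge hle]
      · simp only [if_neg hne, ih]
        have ht : t = o := not_not.mp hne
        simp [ht]

-- A's outer loop is find? of the sweep check
theorem outerA_eq_find (h : List (String × List (String × Int))) (teams l : List String) :
    pvOuterA h teams l = l.find? (fun t => teams.all (pvSweepPred h t)) := by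
  induction l with
  | nil => rfl
  | cons t rest ih =>
      simp only [pvOuterA, List.find?, innerA_eq_all, ih]
      by_cases hc : List.all teams (pvSweepPred h t) = true
      · simp [hc]
      · simp [hc]

-- the eliminated candidate is the start or one of the scanned teams
theorem elim_mem (h : List (String × List (String × Int))) (l : List String) (c : String) :
    pvElim h c l = c ∨ pvElim h c l ∈ l := by
  induction l generalizing c with
  | nil => exact Or.inl rfl
  | cons t rest ih =>
      simp only [pvElim]
      by_cases hcase : c ≠ t ∧ getH2HWins h c t ≤ getH2HWins h t c
      · simp only [if_pos hcase]
        rcases ih t with h1 | h1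
        · right; simp [h1]
        · right; simp [h1]
      · simp only [if_neg hcase]
        rcases ih c with h1 | h1
        · exact Or.inl h1
        · right; simp [h1]

-- if s sweeps all of `teams`, elimination over any suffix containing s (from a candidate in `teams`) lands on s
theorem elim_finds_sweeper (h : List (String × List (String × Int))) (teams : List String)
    (s : String) (hs : teams.all (pvSweepPred h s) = true) :
    ∀ (l : List String) (c : String), (∀ x ∈ l, x ∈ teams) → c ∈ teams →
      (s = c ∨ s ∈ l) → pvElim h c l = s := by
  intro l
  induction l with
  | nil =>
      intro c _ _ hsc
      rcases hsc with rfl | hmem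
      · rfl
      · exact absurd hmem (List.not_mem_nil)
  | cons t rest ih =>
      intro c hsub hc hsc
      have ht : t ∈ teams := hsub t (by simp)
      have hsub' : ∀ x ∈ rest, x ∈ teams := fun x hx => hsub x (by simp [hx])
      have sweep : ∀ x ∈ teams, s = x ∨ getH2HWins h x s < getH2HWins h s x := by
        intro x hx
        have := List.all_eq_true.mp hs x hx
        simp only [pvSweepPred, Bool.or_eq_true, beq_iff_eq, decide_eq_true_eq] at this
        exact this
      simp only [pvElim]
      by_cases hcase : c ≠ t ∧ getH2HWins h c t ≤ getH2HWins h t c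
      · -- candidate becomes t
        simp only [if_pos hcase]
        rcases hsc with rfl | hmem
        · -- s = c: but then s beats t (t ≠ s), contradicting the elimination condition
          rcases sweep t ht with rfl | hlt
          · exact absurd rfl hcase.1
          · exact absurd hcase.2 (not_le.mpr hlt)
        · rcases List.mem_cons.mp hmem with rfl | hrest
          · exact ih _ hsub' ht (Or.inl rfl)
          · exact ih t hsub' ht (Or.inr hrest)
      · -- candidate stays c
        simp only [if_neg hcase]
        rcases hsc with rfl | hmem
        · exact ih _ hsub' hc (Or.inl rfl)
        · rcases List.mem_cons.mp hmem with rfl | hrest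
          · -- s = t and the elimination condition failed: contradiction unless s = c
            by_cases hst : c = s
            · exact ih c hsub' hc (Or.inl hst.symm)
            · rcases sweep c hc with rfl | hlt
              · exact absurd rfl hst
              · exact absurd ⟨fun hct => hst hct, le_of_lt hlt⟩ hcase
          · exact ih c hsub' hc (Or.inr hrest)

-- ===== VERDICT (by name: the statement is the Claim_ definition above) =====
theorem head_to_head_sweep_spec : Claim_equal_head_to_head_sweep := by
  intro teams head_to_head _
  unfold Spec_head_to_head_sweep head_to_head_sweep head_to_head_sweep_alt
  by_cases hh : head_to_head = []
  · simp [hh]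
  · simp only [if_neg hh]
    match teams with
    | [] => simp [pvOuterA]
    | t0 :: rest =>
      rw [outerA_eq_find]
      rcases hfind : (t0 :: rest).find? (fun t => (t0 :: rest).all (pvSweepPred head_to_head t)) with _ | a
      · -- no sweeper: the candidate fails verification
        have hnone := List.find?_eq_none.mp hfind
        have hc := elim_mem head_to_head rest t0
        have hcm : pvElim head_to_head t0 rest ∈ t0 :: rest := by
          rcases hc with h1 | h1
          · simp [h1]
          · simp [h1]
        have := hnone _ hcm
        simp only [Bool.not_eq_true] at this
        simp [this]
      · -- a sweeper a exists: elimination lands on a and verification succeeds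
        have hpa : ((t0 :: rest).all (pvSweepPred head_to_head a)) = true := by
          have := List.find?_some hfind
          simpa using this
        have hma : a ∈ t0 :: rest := List.mem_of_find?_eq_some hfind
        have helim : pvElim head_to_head t0 rest = a := by
          apply elim_finds_sweeper head_to_head (t0 :: rest) a hpa rest t0
          · intro x hx; simp [hx]
          · simp
          · rcases List.mem_cons.mp hma with rfl | hr
            · exact Or.inl rfl
            · exact Or.inr hr
        simp [helim, hpa]
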